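-- pv_equiv track=rewrite | github.com/Alessiia19/Korrecto-project | feedback/feedback.py | select_best_tip
-- ===== SOURCE A (Python) =====
-- def select_best_tip(tips_dict):
--     """
--     Selects the most relevant tip from those recorded in tips_dict:
--     - Returns the tip with the highest count and highest priority.
--     - If no tip has a count > 0, returns an empty string.
--
--     Args:
--         tips_dict (dict): Dictionary of tips.
--
--     Returns:
--         str: The selected tip, or "" if none.
--     """
--
--     tips_detected = []
--     for tip, values in tips_dict.items():
--         count = values["count"]
--
--         if tip == "Lower yourself by bending your knees." or tip == "Bend your elbows more for a proper push-up.":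
--             if count < 30:
--                 count = 0
--         if tip == "Close your legs when you lower your arms!" or tip == "Open your legs more when you raise your arms!":
--             if count < 15:
--                 count = 0
--         if count > 0:
--             tips_detected.append((tip, count, values["priority"]))
--
--     if not tips_detected:
--         return ""
--
--     tips_detected.sort(key=lambda x: (-x[1], x[2]))
--     return tips_detected[0][0]
-- ===== SOURCE B (Python) =====
-- def _effective_count(tip, count):
--     if tip in ("Lower yourself by bending your knees.", "Bend your elbows more for a proper push-up."):
--         return 0 if count < 30 else count
--     if tip in ("Close your legs when you lower your arms!", "Open your legs more when you raise your arms!"):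
--         return 0 if count < 15 else count
--     return count
--
--
-- def select_best_tip(tips_dict):
--     best_tip, best_count, best_priority = "", 0, 0
--     for tip, values in tips_dict.items():
--         count = _effective_count(tip, values["count"])
--         if count > 0:
--             priority = values["priority"]
--             if count > best_count or (count == best_count and priority < best_priority):
--                 best_tip, best_count, best_priority = tip, count, priority
--     return best_tip
-- ===== Notes on version B (the rewrite author's own statement) =====
-- stated objective: simpler
-- what changed: Replaces the collect-into-a-list-then-stable-sort-and-take-head pipeline by a single pass keeping one running best (count, priority) with a strict 'higher count, then lower priority' replacement test, so no intermediate list and no sort are needed.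
import Mathlib
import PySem

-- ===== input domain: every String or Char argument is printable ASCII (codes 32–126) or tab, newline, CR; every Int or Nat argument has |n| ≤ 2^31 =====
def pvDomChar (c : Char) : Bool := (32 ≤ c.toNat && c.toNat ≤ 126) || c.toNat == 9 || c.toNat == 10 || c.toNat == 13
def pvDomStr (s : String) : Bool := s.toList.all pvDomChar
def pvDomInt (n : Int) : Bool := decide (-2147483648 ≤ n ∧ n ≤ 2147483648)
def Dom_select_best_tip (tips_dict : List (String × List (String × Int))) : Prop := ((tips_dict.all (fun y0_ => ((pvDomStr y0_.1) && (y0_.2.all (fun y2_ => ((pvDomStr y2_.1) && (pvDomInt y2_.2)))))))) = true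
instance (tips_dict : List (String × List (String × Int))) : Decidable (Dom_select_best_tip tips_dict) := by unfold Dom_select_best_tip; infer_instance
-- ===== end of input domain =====

-- B replaces A's collect-filter-then-stable-sort-and-take-head by a single pass keeping one
-- running best (count, priority) with a strict replacement test (simpler; no list, no sort).


-- ===== PORT A =====
def select_best_tip (tips_dict : List (String × List (String × Int))) : String :=
  let tips_detected := tips_dict.foldl (fun acc p =>
    let tip := p.1
    let count := (p.2.lookup "count").getD 0
    let count := if tip == "Lower yourself by bending your knees." || tip == "Bend your elbows more for a proper push-up."
                 then (if count < 30 then 0 else count) else count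
    let count := if tip == "Close your legs when you lower your arms!" || tip == "Open your legs more when you raise your arms!"
                 then (if count < 15 then 0 else count) else count
    if count > 0 then acc ++ [(tip, count, (p.2.lookup "priority").getD 0)] else acc) []
  if tips_detected = [] then ""
  else
    match PySem.List.sorted2 tips_detected (fun x => -x.2.1) (fun x => x.2.2) with
    | [] => ""
    | x :: _ => x.1

-- ===== PORT B =====
-- helper of Source B: the threshold-adjusted count
def pvAdj (tip : String) (count : Int) : Int :=
  if tip == "Lower yourself by bending your knees." || tip == "Bend your elbows more for a proper push-up."
  then (if count < 30 then 0 else count)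
  else if tip == "Close your legs when you lower your arms!" || tip == "Open your legs more when you raise your arms!"
  then (if count < 15 then 0 else count)
  else count

def select_best_tip_alt (tips_dict : List (String × List (String × Int))) : String :=
  (tips_dict.foldl (fun (b : String × Int × Int) p =>
      let count := pvAdj p.1 ((p.2.lookup "count").getD 0)
      if count > 0 then
        let priority := (p.2.lookup "priority").getD 0
        if count > b.2.1 || (count == b.2.1 && priority < b.2.2) then (p.1, count, priority) else b
      else b) ("", 0, 0)).1

-- ===== PRECONDITION & SPEC =====
-- Pre_ excludes exactly the inputs where the Python raises KeyError: an entry without a "count"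
-- key, or without a "priority" key while its threshold-adjusted count is positive.
def Pre_select_best_tip (tips_dict : List (String × List (String × Int))) : Prop :=
  ∀ p ∈ tips_dict, (p.2.lookup "count").isSome = true ∧
    (0 < pvAdj p.1 ((p.2.lookup "count").getD 0) → (p.2.lookup "priority").isSome = true)
instance (tips_dict : List (String × List (String × Int))) : Decidable (Pre_select_best_tip tips_dict) := by unfold Pre_select_best_tip; infer_instance

def pvWitness_select_best_tip : (List (String × List (String × Int))) :=
  [("Lower yourself by bending your knees.", [("count", 40), ("priority", 2)]),
   ("some tip", [("count", 5), ("priority", 1)])]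

def Spec_select_best_tip (tips_dict : List (String × List (String × Int))) (out : String) : Prop := out = select_best_tip_alt tips_dict
instance (tips_dict : List (String × List (String × Int))) (out : String) : Decidable (Spec_select_best_tip tips_dict out) := by unfold Spec_select_best_tip; infer_instance

-- ===== CLAIM (what is proved, stated in full; the proofs are below) =====
def Claim_equal_select_best_tip : Prop := ∀ (tips_dict : List (String × List (String × Int))), Dom_select_best_tip tips_dict → Pre_select_best_tip tips_dict → Spec_select_best_tip tips_dict (select_best_tip tips_dict)

-- ===== LEMMAS AND PROOFS =====

-- the filter both loops implement: `some (tip, adjusted count, priority)` when the adjusted count is positive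
def pvKeep (p : String × List (String × Int)) : Option (String × Int × Int) :=
  let c := pvAdj p.1 ((p.2.lookup "count").getD 0)
  if 0 < c then some (p.1, c, (p.2.lookup "priority").getD 0) else none

-- A's sort key as a strict boolean comparison (the `before` relation sorted2 uses)
def pvLt (x m : String × Int × Int) : Bool :=
  decide ((-x.2.1) < (-m.2.1)) || (!decide ((-m.2.1) < (-x.2.1)) && decide (x.2.2 < m.2.2))

-- the running-minimum step min2? uses (first strict minimum under pvLt)
def pvMinStep (s : Option (String × Int × Int)) (x : String × Int × Int) : Option (String × Int × Int) :=
  match s with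
  | none => some x
  | some m => if pvLt x m then some x else some m

-- A's sequential threshold adjustment equals pvAdj (the two name groups are disjoint)
theorem pv_adj_eq (tip : String) (c : Int) :
    (let c1 := if tip == "Lower yourself by bending your knees." || tip == "Bend your elbows more for a proper push-up."
               then (if c < 30 then 0 else c) else c
     if tip == "Close your legs when you lower your arms!" || tip == "Open your legs more when you raise your arms!"
     then (if c1 < 15 then 0 else c1) else c1) = pvAdj tip c := by
  unfold pvAdj
  by_cases h1 : (tip == "Lower yourself by bending your knees." || tip == "Bend your elbows more for a proper push-up.") = true
  · have h2 : (tip == "Close your legs when you lower your arms!" || tip == "Open your legs more when you raise your arms!") = false := by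
      simp only [Bool.or_eq_true, beq_iff_eq] at h1
      rcases h1 with rfl | rfl <;> decide
    simp [h1, h2]
  · simp only [Bool.not_eq_true] at h1
    simp [h1]

-- A's accumulation loop builds exactly the pvKeep-filtered list
theorem pvA_loop_eq (xs : List (String × List (String × Int))) :
    ∀ acc : List (String × Int × Int),
    xs.foldl (fun acc p =>
      let tip := p.1
      let count := (p.2.lookup "count").getD 0
      let count := if tip == "Lower yourself by bending your knees." || tip == "Bend your elbows more for a proper push-up."
                   then (if count < 30 then 0 else count) else count
      let count := if tip == "Close your legs when you lower your arms!" || tip == "Open your legs more when you raise your arms!"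
                   then (if count < 15 then 0 else count) else count
      if count > 0 then acc ++ [(tip, count, (p.2.lookup "priority").getD 0)] else acc) acc
    = acc ++ xs.filterMap pvKeep := by
  induction xs with
  | nil => intro acc; simp
  | cons p xs ih =>
    intro acc
    simp only [List.foldl_cons, List.filterMap_cons, ih]
    rw [pv_adj_eq p.1 ((p.2.lookup "count").getD 0)]
    unfold pvKeep
    by_cases h : 0 < pvAdj p.1 ((p.2.lookup "count").getD 0)
    · simp [h]
    · simp [h]

-- head of an insertBy-fold is the running strict minimum (min2?-style fold)
theorem pv_head_insert_fold (xs : List (String × Int × Int)) :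
    ∀ acc : List (String × Int × Int),
    (xs.foldl (fun a x => PySem.List.insertBy pvLt x a) acc).head?
    = xs.foldl pvMinStep acc.head? := by
  induction xs with
  | nil => intro acc; rfl
  | cons x xs ih =>
    intro acc
    simp only [List.foldl_cons, ih]
    congr 1
    cases acc with
    | nil => rfl
    | cons h t =>
      simp only [PySem.List.insertBy, List.head?, pvMinStep]
      by_cases hx : pvLt x h = true
      · simp [hx]
      · simp [hx]

-- B's loop equals a running-best fold over the pvKeep-filtered list
theorem pvB_filter (xs : List (String × List (String × Int))) :
    ∀ b : String × Int × Int,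
    xs.foldl (fun (b : String × Int × Int) p =>
      let count := pvAdj p.1 ((p.2.lookup "count").getD 0)
      if count > 0 then
        let priority := (p.2.lookup "priority").getD 0
        if count > b.2.1 || (count == b.2.1 && priority < b.2.2) then (p.1, count, priority) else b
      else b) b
    = (xs.filterMap pvKeep).foldl (fun (b : String × Int × Int) e =>
        if e.2.1 > b.2.1 || (e.2.1 == b.2.1 && e.2.2 < b.2.2) then e else b) b := by
  induction xs with
  | nil => intro b; rfl
  | cons p xs ih =>
    intro b
    simp only [List.foldl_cons, List.filterMap_cons]
    by_cases h : 0 < pvAdj p.1 ((p.2.lookup "count").getD 0)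
    · have hk : pvKeep p = some (p.1, pvAdj p.1 ((p.2.lookup "count").getD 0), (p.2.lookup "priority").getD 0) := by
        simp [pvKeep, h]
      rw [hk]
      simp only [List.foldl_cons, gt_iff_lt, if_pos h]
      exact ih _
    · have hk : pvKeep p = none := by simp [pvKeep, h]
      rw [hk]
      simp only [gt_iff_lt, if_neg h]
      exact ih b

-- the running strict minimum (with `none` start) and the running best (with sentinel start)
-- agree on a list of positive-count entries
theorem pvB_loop_eq (xs : List (String × Int × Int)) (hpos : ∀ e ∈ xs, 0 < e.2.1) :
    ∀ (s : Option (String × Int × Int)) (b : String × Int × Int),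
    ((s = none ∧ b = ("", 0, 0)) ∨ s = some b) →
    ((xs.foldl pvMinStep s).map Prod.fst).getD ""
    = (xs.foldl (fun (b : String × Int × Int) e =>
        if e.2.1 > b.2.1 || (e.2.1 == b.2.1 && e.2.2 < b.2.2) then e else b) b).1 := by
  induction xs with
  | nil =>
    intro s b hrel
    rcases hrel with ⟨rfl, rfl⟩ | rfl <;> rfl
  | cons e xs ih =>
    intro s b hrel
    have hpe : 0 < e.2.1 := hpos e (by simp)
    have hpos' : ∀ x ∈ xs, 0 < x.2.1 := fun x hx => hpos x (by simp [hx])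
    simp only [List.foldl_cons, pvMinStep]
    rcases hrel with ⟨rfl, rfl⟩ | rfl
    · have hc : (e.2.1 > (0:Int) || (e.2.1 == (0:Int) && e.2.2 < (0:Int))) = true := by
        simp only [Bool.or_eq_true, decide_eq_true_eq, gt_iff_lt]
        left; exact hpe
      rw [hc]
      exact ih hpos' (some e) e (Or.inr rfl)
    · have hcond : pvLt e b = (e.2.1 > b.2.1 || (e.2.1 == b.2.1 && e.2.2 < b.2.2)) := by
        unfold pvLt
        rcases lt_trichotomy e.2.1 b.2.1 with h | h | h
        · simp [show ¬(-e.2.1 < -b.2.1) by omega, show -b.2.1 < -e.2.1 by omega,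
                show ¬ b.2.1 < e.2.1 by omega, show e.2.1 ≠ b.2.1 by omega]
        · simp [h]
        · simp [show -e.2.1 < -b.2.1 by omega, h]
      simp only [hcond]
      by_cases hb : (e.2.1 > b.2.1 || (e.2.1 == b.2.1 && e.2.2 < b.2.2)) = true
      · rw [hb]; simp only [if_true]
        exact ih hpos' (some e) e (Or.inr rfl)
      · rw [Bool.not_eq_true] at hb
        rw [hb]; simp only [Bool.false_eq_true, if_false]
        exact ih hpos' (some b) b (Or.inr rfl)

-- every element the filter keeps has a positive count
theorem pvKeep_pos (xs : List (String × List (String × Int))) :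
    ∀ e ∈ xs.filterMap pvKeep, 0 < e.2.1 := by
  intro e he
  rcases List.mem_filterMap.mp he with ⟨p, _, hp⟩
  unfold pvKeep at hp
  by_cases h : 0 < pvAdj p.1 ((p.2.lookup "count").getD 0)
  · simp only [h, if_pos] at hp
    cases hp; simpa using h
  · simp [h] at hp

-- ===== VERDICT (by name: the statement is the Claim_ definition above) =====
theorem select_best_tip_spec : Claim_equal_select_best_tip := by
  intro tips _hdom _hpre
  unfold Spec_select_best_tip select_best_tip select_best_tip_alt
  rw [pvA_loop_eq tips [], pvB_filter tips ("", 0, 0)]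
  simp only [List.nil_append]
  have hsort : PySem.List.sorted2 (tips.filterMap pvKeep) (fun x => -x.2.1) (fun x => x.2.2)
      = (tips.filterMap pvKeep).foldl (fun a x => PySem.List.insertBy pvLt x a) [] := rfl
  have hhead : (PySem.List.sorted2 (tips.filterMap pvKeep) (fun x => -x.2.1) (fun x => x.2.2)).head?
      = (tips.filterMap pvKeep).foldl pvMinStep none := by
    rw [hsort]; exact pv_head_insert_fold (tips.filterMap pvKeep) []
  have hmain := pvB_loop_eq (tips.filterMap pvKeep) (pvKeep_pos tips) none ("", 0, 0) (Or.inl ⟨rfl, rfl⟩)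
  rw [← hhead] at hmain
  by_cases hLnil : tips.filterMap pvKeep = []
  · rw [hLnil]
    rw [hLnil] at hmain
    exact hmain
  · rw [if_neg hLnil]
    cases hs : PySem.List.sorted2 (tips.filterMap pvKeep) (fun x => -x.2.1) (fun x => x.2.2) with
    | nil =>
      have hperm := PySem.List.sorted2_perm (xs := tips.filterMap pvKeep)
        (k1 := fun x => -x.2.1) (k2 := fun x => x.2.2) (rev := false)
      rw [hs] at hperm
      exact absurd hperm.symm.eq_nil hLnil
    | cons m t =>
      rw [hs] at hmain
      exact hmain
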